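-- pv_equiv track=rewrite | github.com/Senaphim/mon_matchups | src/pTypes.py | combine_types
-- ===== SOURCE A (Python) =====
-- def combine_types(type_lists, atk=True):
--     combined_type = []
--     for i in range(len(type_lists[0])):
--         each_type = []
--         for type_list in type_lists:
--             each_type.append(type_list[i])
--         if atk:
--             combined_type.append(max(each_type))
--         else:
--             combined_type.append(min(each_type))
--     return combined_type
-- ===== SOURCE B (Python) =====
-- def combine_types(type_lists, atk=True):
--     func = max if atk else min
--     combined = list(type_lists[0])
--     for type_list in type_lists[1:]:
--         for i in range(len(combined)):
--             combined[i] = func(combined[i], type_list[i])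
--     return combined
-- ===== Notes on version B (the rewrite author's own statement) =====
-- stated objective: alternative
-- what changed: Instead of transposing each column into a temporary list and calling max/min on it, B keeps a running element-wise accumulator seeded from the first list and folds the remaining lists into it with a binary max/min, allocating no per-column temporaries.
import Mathlib
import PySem

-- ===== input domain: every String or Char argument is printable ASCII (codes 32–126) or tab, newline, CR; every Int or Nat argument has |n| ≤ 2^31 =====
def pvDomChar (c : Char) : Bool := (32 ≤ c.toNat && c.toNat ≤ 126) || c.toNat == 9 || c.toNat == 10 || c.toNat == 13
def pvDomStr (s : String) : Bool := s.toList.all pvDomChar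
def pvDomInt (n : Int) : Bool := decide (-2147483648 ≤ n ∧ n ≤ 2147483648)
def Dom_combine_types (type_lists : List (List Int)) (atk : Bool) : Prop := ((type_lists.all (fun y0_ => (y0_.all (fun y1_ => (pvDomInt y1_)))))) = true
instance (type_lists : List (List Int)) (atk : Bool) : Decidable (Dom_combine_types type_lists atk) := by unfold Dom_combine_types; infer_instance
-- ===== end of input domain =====

-- B replaces A's per-index column transposition + max()/min() call with a running
-- element-wise accumulator folded across the lists (objective: alternative decomposition).

-- ===== PORT A =====
-- pyGetD is the total form of Python's xs[i]; exact under Pre_ (all indices in range there).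
def combine_types (type_lists : List (List Int)) (atk : Bool) : List Int :=
  (PySem.List.pyRange 0 (PySem.List.len (PySem.List.pyGetD type_lists 0 ([] : List Int))) 1).foldl
    (fun combined_type i =>
      let each_type := type_lists.foldl (fun e tl => e ++ [PySem.List.pyGetD tl i 0]) []
      if atk then combined_type ++ [(PySem.List.max? each_type (fun y => y)).getD 0]
      else combined_type ++ [(PySem.List.min? each_type (fun y => y)).getD 0]) []

-- ===== PORT B =====
def combine_types_alt (type_lists : List (List Int)) (atk : Bool) : List Int :=
  let func : Int → Int → Int := if atk then max else min
  let combined := PySem.List.pyGetD type_lists 0 ([] : List Int)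
  (type_lists.drop 1).foldl
    (fun c tl =>
      (List.range c.length).foldl
        (fun (c : List Int) (i : Nat) => PySem.List.pySetD c (i : Int)
          (func (PySem.List.pyGetD c (i : Int) 0) (PySem.List.pyGetD tl (i : Int) 0))) c)
    combined

-- ===== PRECONDITION & SPEC =====
-- Pre_ excludes exactly the inputs where Python A raises: the empty outer list
-- (type_lists[0] is an IndexError) and inputs where some later list is shorter than
-- the first (type_list[i] is an IndexError). Python B raises on exactly the same inputs.
def Pre_combine_types (type_lists : List (List Int)) (atk : Bool) : Prop :=
  type_lists ≠ [] ∧ ∀ tl ∈ type_lists, (type_lists.headD []).length ≤ tl.length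
instance (type_lists : List (List Int)) (atk : Bool) : Decidable (Pre_combine_types type_lists atk) := by unfold Pre_combine_types; infer_instance
def pvWitness_combine_types : List (List Int) × Bool := ([[1, 2], [3, 0]], true)

def Spec_combine_types (type_lists : List (List Int)) (atk : Bool) (out : List Int) : Prop := out = combine_types_alt type_lists atk
instance (type_lists : List (List Int)) (atk : Bool) (out : List Int) : Decidable (Spec_combine_types type_lists atk out) := by unfold Spec_combine_types; infer_instance

-- ===== CLAIM (what is proved, stated in full; the proofs are below) =====
def Claim_equal_combine_types : Prop := ∀ (type_lists : List (List Int)) (atk : Bool), Dom_combine_types type_lists atk → Pre_combine_types type_lists atk → Spec_combine_types type_lists atk (combine_types type_lists atk)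

-- ===== LEMMAS AND PROOFS =====

-- the element-wise fold of `f` down column `k`, seeded with `x`
def pvColFold (f : Int → Int → Int) (rest : List (List Int)) (x : Int) (k : Nat) : Int :=
  (rest.map (fun tl => PySem.List.pyGetD tl (k : Int) 0)).foldl f x

lemma pv_inner_length (f : Int → Int → Int) (tl : List Int) (m : Nat) (c : List Int) :
    ((List.range m).foldl
      (fun (c : List Int) (i : Nat) => PySem.List.pySetD c (i : Int)
        (f (PySem.List.pyGetD c (i : Int) 0) (PySem.List.pyGetD tl (i : Int) 0))) c).length
    = c.length := by
  induction m with
  | zero => rfl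
  | succ m ih =>
      rw [List.range_succ, List.foldl_append, List.foldl_cons, List.foldl_nil,
        PySem.List.length_pySetD, ih]

-- B's inner loop: every position k < m becomes f c[k] tl[k]; positions ≥ m are untouched.
lemma pv_inner_getD (f : Int → Int → Int) (tl : List Int) (m : Nat) (c : List Int)
    (hm : m ≤ c.length) (k : Nat) :
    ((List.range m).foldl
      (fun (c : List Int) (i : Nat) => PySem.List.pySetD c (i : Int)
        (f (PySem.List.pyGetD c (i : Int) 0) (PySem.List.pyGetD tl (i : Int) 0))) c).getD k 0
    = if k < m then f (c.getD k 0) (PySem.List.pyGetD tl (k : Int) 0) else c.getD k 0 := by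
  induction m generalizing k with
  | zero => simp
  | succ m ih =>
      have hm' : m ≤ c.length := Nat.le_of_succ_le hm
      have hlen := pv_inner_length f tl m c
      rw [List.range_succ, List.foldl_append, List.foldl_cons, List.foldl_nil,
        PySem.List.pySetD_natCast, PySem.List.pyGetD_natCast]
      rw [List.getD_eq_getElem?_getD, List.getElem?_set, hlen]
      by_cases hk : m = k
      · subst hk
        rw [if_pos rfl, if_pos (Nat.lt_of_succ_le hm)]
        simp only [Option.getD_some]
        rw [ih hm' m, if_neg (Nat.lt_irrefl m)]
        simp
      · rw [if_neg hk, ← List.getD_eq_getElem?_getD, ih hm' k]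
        rcases Nat.lt_trichotomy k m with h | h | h
        · rw [if_pos h, if_pos (Nat.lt_succ_of_lt h)]
        · exact absurd h.symm hk
        · rw [if_neg (Nat.lt_asymm h), if_neg (by omega)]

-- B's outer fold, characterized pointwise.
lemma pv_outer (f : Int → Int → Int) (rest : List (List Int)) (c : List Int) :
    (rest.foldl
      (fun c tl =>
        (List.range c.length).foldl
          (fun (c : List Int) (i : Nat) => PySem.List.pySetD c (i : Int)
            (f (PySem.List.pyGetD c (i : Int) 0) (PySem.List.pyGetD tl (i : Int) 0))) c) c)
    = (List.range c.length).map (fun k => pvColFold f rest (c.getD k 0) k) := by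
  induction rest generalizing c with
  | nil =>
      apply List.ext_getElem (by simp)
      intro i h1 h2
      simp only [List.getElem_map, List.getElem_range, pvColFold, List.map_nil, List.foldl_nil]
      exact (List.getD_eq_getElem c 0 h1).symm
  | cons tl rest ih =>
      rw [List.foldl_cons, ih]
      rw [pv_inner_length f tl c.length c]
      apply List.map_congr_left
      intro k hk
      rw [List.mem_range] at hk
      rw [pv_inner_getD f tl c.length c (Nat.le_refl _) k, if_pos hk]
      simp only [pvColFold, List.map_cons, List.foldl_cons]

-- the A-shape and the B-shape agree for any reducer f whose column aggregate g
-- satisfies g (x :: t) = t.foldl f x (g = max/min of a nonempty list)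
lemma pv_AB (f : Int → Int → Int) (g : List Int → Int)
    (hg : ∀ x t, g (x :: t) = t.foldl f x) (first : List Int) (rest : List (List Int)) :
    (PySem.List.pyRange 0 (PySem.List.len first) 1).foldl
      (fun c i => c ++ [g ((first :: rest).foldl (fun e tl => e ++ [PySem.List.pyGetD tl i 0]) [])]) []
    = rest.foldl
        (fun c tl =>
          (List.range c.length).foldl
            (fun (c : List Int) (i : Nat) => PySem.List.pySetD c (i : Int)
              (f (PySem.List.pyGetD c (i : Int) 0) (PySem.List.pyGetD tl (i : Int) 0))) c)
        first := by
  rw [pv_outer, PySem.List.foldl_append_singleton_eq_map, List.nil_append]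
  rw [PySem.List.len_eq, PySem.List.pyRange_one, List.map_map]
  simp only [Int.sub_zero, Int.toNat_natCast, Function.comp_def, zero_add]
  apply List.map_congr_left
  intro k hk
  rw [List.mem_range] at hk
  rw [PySem.List.foldl_append_singleton_eq_map, List.nil_append, List.map_cons, hg]
  simp only [pvColFold, PySem.List.pyGetD_natCast]

theorem pv_main (type_lists : List (List Int)) (atk : Bool) :
    combine_types type_lists atk = combine_types_alt type_lists atk := by
  cases type_lists with
  | nil => cases atk <;> rfl
  | cons first rest =>
      cases atk
      · show _ = _
        unfold combine_types combine_types_alt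
        simp only [Bool.false_eq_true, if_false, PySem.List.pyGetD_zero_cons, List.drop_one,
          List.tail_cons]
        exact pv_AB min (fun e => (PySem.List.min? e (fun y => y)).getD 0)
          (fun x t => by simp [PySem.List.min?_id_cons]) first rest
      · show _ = _
        unfold combine_types combine_types_alt
        simp only [if_true, PySem.List.pyGetD_zero_cons, List.drop_one, List.tail_cons]
        exact pv_AB max (fun e => (PySem.List.max? e (fun y => y)).getD 0)
          (fun x t => by simp [PySem.List.max?_id_cons]) first rest

-- ===== VERDICT (by name: the statement is the Claim_ definition above) =====
theorem combine_types_spec : Claim_equal_combine_types := by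
  intro tls atk _ _
  unfold Spec_combine_types
  exact pv_main tls atk
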